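-- pv_equiv track=rewrite | github.com/EricL0wry/algorithm-practice | python-arcade/increase-number-roundness.py | increaseNumberRoundness
-- ===== SOURCE A (Python) =====
-- def increaseNumberRoundness(n):
--   num_string = str(n)[::-1]
--   non_zeroes = 0
--
--   for num in range(len(num_string)):
--     if num_string[num] == '0':
--       if non_zeroes > 0:
--         return True
--       else:
--         continue
--     else:
--       non_zeroes += 1
--
--   return False
-- ===== SOURCE B (Python) =====
-- def increaseNumberRoundness(n):
--     return '0' in str(n).rstrip('0')
-- ===== Notes on version B (the rewrite author's own statement) =====
-- stated objective: simpler
-- what changed: Replaces the reversed-string index loop with a non-zero counter by a strip-then-membership formulation: drop the trailing run of '0' characters with rstrip('0') and test whether any '0' remains.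
import Mathlib
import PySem

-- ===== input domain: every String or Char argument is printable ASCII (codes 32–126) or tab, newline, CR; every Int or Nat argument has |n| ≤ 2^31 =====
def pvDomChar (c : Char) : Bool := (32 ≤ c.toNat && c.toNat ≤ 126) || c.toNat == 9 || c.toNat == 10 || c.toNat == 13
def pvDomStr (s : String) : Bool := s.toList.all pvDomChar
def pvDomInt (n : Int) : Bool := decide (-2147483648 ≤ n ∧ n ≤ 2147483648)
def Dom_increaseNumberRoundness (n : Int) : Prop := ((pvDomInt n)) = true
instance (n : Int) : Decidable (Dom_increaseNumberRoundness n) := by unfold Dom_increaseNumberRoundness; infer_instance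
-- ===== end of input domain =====

-- B replaces A's reversed-string index loop with a non-zero counter by
-- "strip the trailing '0' run, then test whether a '0' remains" (objective: simpler).

-- ===== PORT A =====
-- the 'for num in range(len(num_string))' loop with early return, as structural
-- recursion over the same characters with the same non_zeroes counter
def pvLoopA : List Char → Nat → Bool
  | [], _ => false
  | c :: rest, nonZeroes =>
      if c = '0' then
        if nonZeroes > 0 then true else pvLoopA rest nonZeroes
      else
        pvLoopA rest (nonZeroes + 1)

def increaseNumberRoundness (n : Int) : Bool :=
  -- str(n)[::-1]
  let numString : List Char :=
    (PySem.List.slice? (PySem.Int.toChars n) none none (-1)).getD []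
  pvLoopA numString 0

-- ===== PORT B =====
-- s.rstrip('0'): hand port (PySem has no rstrip-with-chars); exact — drops exactly
-- the maximal trailing run of '0' characters
def pvRstripZeros (s : List Char) : List Char :=
  (s.reverse.dropWhile (· == '0')).reverse

def increaseNumberRoundness_alt (n : Int) : Bool :=
  -- '0' in str(n).rstrip('0')
  PySem.Chars.isIn ['0'] (pvRstripZeros (PySem.Int.toChars n))

-- ===== PRECONDITION & SPEC =====
def Spec_increaseNumberRoundness (n : Int) (out : Bool) : Prop := out = increaseNumberRoundness_alt n
instance (n : Int) (out : Bool) : Decidable (Spec_increaseNumberRoundness n out) := by unfold Spec_increaseNumberRoundness; infer_instance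

-- ===== CLAIM (what is proved, stated in full; the proofs are below) =====
def Claim_equal_increaseNumberRoundness : Prop := ∀ (n : Int), Dom_increaseNumberRoundness n → Spec_increaseNumberRoundness n (increaseNumberRoundness n)

-- ===== LEMMAS AND PROOFS =====

-- single-character substring test = membership
theorem pv_isIn_singleton (c : Char) (s : List Char) :
    PySem.Chars.isIn [c] s = decide (c ∈ s) := by
  by_cases h : c ∈ s
  · simp [h]
    rw [PySem.Chars.isIn_iff_infix]
    obtain ⟨pre, suf, rfl⟩ := List.mem_iff_append.mp h
    exact ⟨pre, suf, by simp⟩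
  · simp [h]
    rw [PySem.Chars.isIn_eq_false_iff]
    intro hinf
    exact h (hinf.subset (by simp))

-- once non_zeroes > 0, A's loop returns true exactly on seeing a '0'
theorem pvLoopA_pos (s : List Char) (k : Nat) :
    pvLoopA s (k + 1) = decide ('0' ∈ s) := by
  induction s generalizing k with
  | nil => simp [pvLoopA]
  | cons c rest ih =>
      by_cases hc : c = '0'
      · simp [pvLoopA, hc]
      · simp [pvLoopA, hc, ih]
        intro h; exact absurd h.symm hc

-- A's loop from counter 0 = "a '0' survives after skipping the leading '0' run"
theorem pvLoopA_zero (s : List Char) :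
    pvLoopA s 0 = decide ('0' ∈ s.dropWhile (· == '0')) := by
  induction s with
  | nil => simp [pvLoopA]
  | cons c rest ih =>
      by_cases hc : c = '0'
      · simp [pvLoopA, hc, ih, List.dropWhile]
      · have hbe : (c == '0') = false := by simp [hc]
        simp [pvLoopA, hc, pvLoopA_pos, List.dropWhile, hbe]
        intro h; exact absurd h.symm hc

-- ===== VERDICT (by name: the statement is the Claim_ definition above) =====
theorem increaseNumberRoundness_spec : Claim_equal_increaseNumberRoundness := by
  intro n _
  unfold Spec_increaseNumberRoundness increaseNumberRoundness increaseNumberRoundness_alt pvRstripZeros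
  rw [PySem.List.slice?_none_none_neg_one]
  simp only [Option.getD_some]
  rw [pvLoopA_zero, pv_isIn_singleton]
  simp
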